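-- pv_equiv track=rewrite | github.com/Anusuya-Balakrishnan/Python-Basic-Programs | 5.1.2022/codingBatProgram.py | string_splosion
-- ===== SOURCE A (Python) =====
-- def string_splosion(str):
--   n=len(str)
--   c=0
--   string=""
--   while(n>=c):
--       string=string+str[:c]
--       c+=1
--   return string
-- ===== SOURCE B (Python) =====
-- def string_splosion(str):
--   if not str:
--     return ""
--   return string_splosion(str[:-1]) + str
-- ===== Notes on version B (the rewrite author's own statement) =====
-- stated objective: simpler
-- what changed: Replaced the counter-driven while loop that appends str[:c] for c = 0..n with a three-line recursion that drops the last character and appends the full string.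
import Mathlib
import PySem

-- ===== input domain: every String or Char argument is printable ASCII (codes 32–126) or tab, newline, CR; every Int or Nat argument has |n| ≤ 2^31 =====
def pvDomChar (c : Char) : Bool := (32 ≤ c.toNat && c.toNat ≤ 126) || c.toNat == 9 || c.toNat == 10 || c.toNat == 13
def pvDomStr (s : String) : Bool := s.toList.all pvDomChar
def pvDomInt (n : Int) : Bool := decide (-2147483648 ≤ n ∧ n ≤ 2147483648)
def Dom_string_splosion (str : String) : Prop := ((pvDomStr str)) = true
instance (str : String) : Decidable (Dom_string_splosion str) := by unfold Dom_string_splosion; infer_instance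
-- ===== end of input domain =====

-- B replaces A's counter-driven while loop over prefixes with a drop-last-character recursion (simpler decomposition, same cost).

-- ===== PORT A =====
-- A: while n >= c: string += str[:c]; c += 1 — the counter runs c = 0,1,…,n, i.e. a fold over range(0, n+1).
def string_splosion (str : String) : String :=
  let l := str.toList
  let n : Int := PySem.Str.len str
  String.ofList ((PySem.List.pyRange 0 (n + 1) 1).foldl
    (fun string c => string ++ PySem.List.slice l none (some c)) [])

-- ===== PORT B =====
-- str[:-1] is ported as List.dropLast (exact: PySem.List.slice_to_neg_one).
def altChars (l : List Char) : List Char :=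
  if h : l = [] then [] else altChars l.dropLast ++ l
termination_by l.length
decreasing_by
  have : l.length ≠ 0 := fun h0 => h (List.eq_nil_of_length_eq_zero h0)
  simp [List.length_dropLast]; omega

def string_splosion_alt (str : String) : String :=
  String.ofList (altChars str.toList)

-- ===== PRECONDITION & SPEC =====
def Spec_string_splosion (str : String) (out : String) : Prop := out = string_splosion_alt str
instance (str : String) (out : String) : Decidable (Spec_string_splosion str out) := by unfold Spec_string_splosion; infer_instance

-- ===== CLAIM (what is proved, stated in full; the proofs are below) =====
def Claim_equal_string_splosion : Prop := ∀ (str : String), Dom_string_splosion str → Spec_string_splosion str (string_splosion str)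

-- ===== LEMMAS AND PROOFS =====

theorem key_loop_eq_alt (l : List Char) :
    (PySem.List.pyRange 0 ((l.length : Int) + 1) 1).foldl
      (fun string c => string ++ PySem.List.slice l none (some c)) [] = altChars l := by
  induction hN : l.length using Nat.strong_induction_on generalizing l with
  | _ N ih =>
    subst hN
    by_cases h : l = []
    · subst h
      simp [altChars, PySem.List.slice]
    · rw [altChars]; simp only [h, dif_neg, not_false_iff]
      have hn : (0 : Int) ≤ (l.length : Int) := by positivity
      rw [PySem.List.pyRange_one_succ_right hn, List.foldl_append]
      simp only [List.foldl_cons, List.foldl_nil]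
      have hlen : l.dropLast.length + 1 = l.length := by
        have : l.length ≠ 0 := fun h0 => h (List.eq_nil_of_length_eq_zero h0)
        simp [List.length_dropLast]; omega
      have hcongr : (PySem.List.pyRange 0 ((l.length : Int)) 1).foldl
          (fun string c => string ++ PySem.List.slice l none (some c)) [] =
          (PySem.List.pyRange 0 ((l.dropLast.length : Int) + 1) 1).foldl
          (fun string c => string ++ PySem.List.slice l.dropLast none (some c)) [] := by
        have hr : (PySem.List.pyRange 0 ((l.dropLast.length : Int) + 1) 1) =
            (PySem.List.pyRange 0 ((l.length : Int)) 1) := by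
          rw [← hlen]; push_cast; ring_nf
        rw [hr]
        apply PySem.List.foldl_congr_mem
        intro acc c hc
        have hc' := (PySem.List.mem_pyRange_one).1 hc
        have h0 : 0 ≤ c := hc'.1
        have h1 : c < (l.length : Int) := hc'.2
        congr 1
        rw [PySem.List.slice_to l h0, PySem.List.slice_to l.dropLast h0,
          List.dropLast_eq_take, List.take_take]
        congr 1
        omega
      rw [hcongr, ih l.dropLast.length (by omega) l.dropLast rfl]
      congr 1
      have : PySem.List.slice l none (some ((l.length : Int))) = l.take l.length :=
        PySem.List.slice_to_natCast l l.length
      simp [this]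

theorem string_splosion_spec : Claim_equal_string_splosion := by
  intro str _
  unfold Spec_string_splosion string_splosion string_splosion_alt
  simp only [PySem.Str.len_eq]
  rw [key_loop_eq_alt]
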